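-- pv_equiv track=rewrite | github.com/Project-DSA1/lab1 | Connect4.py | splitAndComb
-- ===== SOURCE A (Python) =====
-- def Comb(N,r):
--     if N==r:
--         s=""
--         for _ in range(N):
--             s += "1"
--         return [s]
--     if r==0:
--         s=""
--         for _ in range(N):
--             s += "0"
--         return [s]
--     withoutMe = Comb(N-1,r)
--     withMe = Comb(N-1,r-1)
--     for i in range(len(withoutMe)):
--         withoutMe[i] = "0"+withoutMe[i]
--     for i in range(len(withMe)):
--         withMe[i] = "1"+withMe[i]
--     return withoutMe+withMe
--
-- def Splits(n,parts,Max):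
--     L =[]
--     if parts < 1:
--         return []
--     if parts==1:
--         if n<=Max:
--             return [(n,)]
--         else:
--             return []
--     if parts == 2:
--         for d in range(Max+1):
--                 if n>=d and n-d <= Max:
--                     L.append((d,n-d))
--         return L
--     for a in range(Max+1):
--         if n<a:
--             break
--         S = Splits(n-a,parts-1,Max)
--         for s in S:
--             t = [a]
--             for x in s:
--                 t.append(x)
--             t = tuple(t)
--             L.append(t)
--     return L
--
-- def splitAndComb(n,parts,Max,firstPlayer):
--     S = Splits(n,parts,Max)
--     if firstPlayer==0:
--         C = Comb(n,n//2)
--     else: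
--         C = Comb(n,n-n//2)
--     M = [[(s,c) for c in C] for s in S]
--     return M
-- ===== SOURCE B (Python) =====
-- def Splits(n, parts, Max):
--     L = []
--     if parts < 1:
--         return []
--     if parts == 1:
--         if n <= Max:
--             return [(n,)]
--         else:
--             return []
--     if parts == 2:
--         for d in range(Max + 1):
--             if n >= d and n - d <= Max:
--                 L.append((d, n - d))
--         return L
--     for a in range(Max + 1):
--         if n < a:
--             break
--         S = Splits(n - a, parts - 1, Max)
--         for s in S:
--             t = [a]
--             for x in s:
--                 t.append(x)
--             t = tuple(t)
--             L.append(t)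
--     return L
--
-- def splitAndComb(n, parts, Max, firstPlayer):
--     # combinations by brute force over integers 0..2**n-1 in ascending order,
--     # keeping those whose binary representation (width n) has exactly r ones
--     r = n // 2 if firstPlayer == 0 else n - n // 2
--     C = []
--     for x in range(2 ** n):
--         bits = ''.join('1' if (x // 2 ** (n - 1 - i)) % 2 else '0' for i in range(n))
--         if bits.count('1') == r:
--             C.append(bits)
--     return [[(s, c) for c in C] for s in Splits(n, parts, Max)]
-- ===== Notes on version B (the rewrite author's own statement) =====
-- stated objective: alternative
-- what changed: The recursive Comb(N,r) helper (branch on with/without leading bit, prefix and concatenate) is replaced by a single brute-force scan of the integers 0..2**n-1, keeping those whose width-n binary string has exactly r ones; ascending integer order reproduces A's emission order exactly, and Splits is kept unchanged.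
-- outside the precondition, e.g. on splitAndComb(-1, 1, 5, 0): A returns [[((-1,), '')]], B raises TypeError
import Mathlib
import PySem

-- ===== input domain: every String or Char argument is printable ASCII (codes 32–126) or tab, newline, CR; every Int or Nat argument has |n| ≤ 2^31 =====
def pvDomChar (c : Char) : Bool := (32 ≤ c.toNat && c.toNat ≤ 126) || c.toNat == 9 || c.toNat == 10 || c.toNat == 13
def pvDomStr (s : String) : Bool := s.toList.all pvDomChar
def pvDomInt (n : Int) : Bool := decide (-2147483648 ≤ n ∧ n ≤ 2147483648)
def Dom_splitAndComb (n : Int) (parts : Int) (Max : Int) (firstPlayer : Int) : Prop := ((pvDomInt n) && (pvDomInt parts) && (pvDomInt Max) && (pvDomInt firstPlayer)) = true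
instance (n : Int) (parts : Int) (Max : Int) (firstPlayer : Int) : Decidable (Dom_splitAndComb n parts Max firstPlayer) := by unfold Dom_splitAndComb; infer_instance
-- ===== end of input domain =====

-- B replaces the recursive Comb(N,r) helper by a brute-force scan of the integers 0..2**n-1,
-- keeping those whose width-n binary string has exactly r ones; objective: alternative.

-- ===== PORT A =====

-- shared helper: the module-level Splits, used verbatim by both Source A and Source B
-- (the inner 'for a in range(Max+1): if n < a: break …' loop, as recursion over the range list)
def pvSplitsLoop (n : Int) (rec : Int → List (List Int)) : List Int → List (List Int) → List (List Int)
  | [], L => L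
  | a :: rest, L =>
    if n < a then L
    else pvSplitsLoop n rec rest (L ++ (rec (n - a)).map (fun s => a :: s))

def pvSplits (n parts Max : Int) : List (List Int) :=
  if parts < 1 then []
  else if parts = 1 then (if n ≤ Max then [[n]] else [])
  else if parts = 2 then
    (PySem.List.pyRange 0 (Max + 1)).foldl
      (fun L d => if d ≤ n ∧ n - d ≤ Max then L ++ [[d, n - d]] else L) []
  else
    pvSplitsLoop n (fun m => pvSplits m (parts - 1) Max) (PySem.List.pyRange 0 (Max + 1)) []
  termination_by parts.toNat
  decreasing_by omega

-- Comb(N,r); the fuel only makes the recursion total — it is never exhausted when 0 ≤ r ≤ N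
def pvComb (fuel : Nat) (N r : Int) : List String :=
  if N = r then [(PySem.List.pyRange 0 N).foldl (fun s _ => s ++ "1") ""]
  else if r = 0 then [(PySem.List.pyRange 0 N).foldl (fun s _ => s ++ "0") ""]
  else match fuel with
    | 0 => []
    | f + 1 =>
      let withoutMe := (pvComb f (N - 1) r).map (fun w => "0" ++ w)
      let withMe := (pvComb f (N - 1) (r - 1)).map (fun w => "1" ++ w)
      withoutMe ++ withMe

def splitAndComb (n : Int) (parts : Int) (Max : Int) (firstPlayer : Int) : List (List (List Int × String)) :=
  let S := pvSplits n parts Max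
  let C := if firstPlayer = 0 then pvComb n.toNat n (PySem.Int.floordiv n 2)
           else pvComb n.toNat n (n - PySem.Int.floordiv n 2)
  S.map (fun s => C.map (fun c => (s, c)))

-- ===== PORT B =====

-- ''.join('1' if (x // 2 ** (n-1-i)) % 2 else '0' for i in range(n)); the exponent n-1-i is
-- ≥ 0 for every i produced by range(n), where .toNat is exact
def pvBits (n x : Int) : String :=
  String.ofList ((PySem.List.pyRange 0 n).map
    (fun i => if PySem.Int.mod (PySem.Int.floordiv x (2 ^ (n - 1 - i).toNat)) 2 ≠ 0 then '1' else '0'))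

def splitAndComb_alt (n : Int) (parts : Int) (Max : Int) (firstPlayer : Int) : List (List (List Int × String)) :=
  let r := if firstPlayer = 0 then PySem.Int.floordiv n 2 else n - PySem.Int.floordiv n 2
  -- range(2 ** n): the exponent n is ≥ 0 on Pre_, where .toNat is exact
  let C := (PySem.List.pyRange 0 ((2 : Int) ^ n.toNat)).foldl
    (fun C x =>
      let bits := pvBits n x
      if (PySem.Str.count bits "1" : Int) = r then C ++ [bits] else C) []
  (pvSplits n parts Max).map (fun s => C.map (fun c => (s, c)))

-- ===== PRECONDITION & SPEC =====
-- Pre_ excludes n < 0: for n ≤ -2 A's Comb recursion never bottoms out (RecursionError),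
-- and at n = -1 A returns a degenerate [''] combination from Comb's base case while B's
-- range(2 ** n) raises (2 ** -1 is a float).
def Pre_splitAndComb (n : Int) (parts : Int) (Max : Int) (firstPlayer : Int) : Prop := 0 ≤ n
instance (n : Int) (parts : Int) (Max : Int) (firstPlayer : Int) : Decidable (Pre_splitAndComb n parts Max firstPlayer) := by unfold Pre_splitAndComb; infer_instance
def pvWitness_splitAndComb : Int × Int × Int × Int := (3, 2, 2, 0)

def Spec_splitAndComb (n : Int) (parts : Int) (Max : Int) (firstPlayer : Int) (out : List (List (List Int × String))) : Prop := out = splitAndComb_alt n parts Max firstPlayer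
instance (n : Int) (parts : Int) (Max : Int) (firstPlayer : Int) (out : List (List (List Int × String))) : Decidable (Spec_splitAndComb n parts Max firstPlayer out) := by unfold Spec_splitAndComb; infer_instance

-- ===== CLAIM (what is proved, stated in full; the proofs are below) =====
def Claim_equal_splitAndComb : Prop := ∀ (n : Int) (parts : Int) (Max : Int) (firstPlayer : Int), Dom_splitAndComb n parts Max firstPlayer → Pre_splitAndComb n parts Max firstPlayer → Spec_splitAndComb n parts Max firstPlayer (splitAndComb n parts Max firstPlayer)

-- ===== LEMMAS AND PROOFS =====

def pvBitsL (m x : Nat) : List Char :=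
  (List.range m).map (fun i => if x / 2 ^ (m - 1 - i) % 2 ≠ 0 then '1' else '0')
def pvE (m r : Nat) : List (List Char) :=
  ((List.range (2 ^ m)).filter (fun x => (pvBitsL m x).count '1' = r)).map (pvBitsL m)

theorem pvBitsL_length (m x : Nat) : (pvBitsL m x).length = m := by simp [pvBitsL]

theorem pvBitsL_zero (m x : Nat) (h : x < 2 ^ m) : pvBitsL (m + 1) x = '0' :: pvBitsL m x := by
  simp [pvBitsL, List.range_succ_eq_map, Nat.div_eq_of_lt h, Function.comp_def, Nat.sub_sub, Nat.add_comm]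

theorem pvBitsL_one (m y : Nat) (h : y < 2 ^ m) : pvBitsL (m + 1) (2 ^ m + y) = '1' :: pvBitsL m y := by
  unfold pvBitsL
  rw [List.range_succ_eq_map, List.map_cons, List.map_map]
  congr 1
  · have h1 : (2 ^ m + y) / 2 ^ (m + 1 - 1 - 0) = 1 := by
      simp only [Nat.add_sub_cancel, Nat.sub_zero]
      rw [Nat.add_comm (2 ^ m) y, Nat.add_div_right y (Nat.two_pow_pos m), Nat.div_eq_of_lt h]
    rw [h1]
    simp
  · apply List.map_congr_left
    intro i hi
    have him : i < m := List.mem_range.mp hi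
    have hk : m + 1 - 1 - Nat.succ i = m - 1 - i := by omega
    rw [Function.comp_apply, hk]
    set k := m - 1 - i with hkdef
    have hkm : k < m := by omega
    have key : (2 ^ m + y) / 2 ^ k % 2 = y / 2 ^ k % 2 := by
      have hm : 2 ^ m = 2 ^ (m - k - 1) * 2 * 2 ^ k := by
        rw [← pow_succ, ← pow_add]
        congr 1; omega
      rw [Nat.add_comm (2 ^ m) y, hm,
        Nat.add_mul_div_right _ _ (Nat.two_pow_pos k),
        Nat.add_mul_mod_self_right]
    rw [key]

theorem pvE_rec (m r : Nat) :
    pvE (m + 1) r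
      = (((List.range (2 ^ m)).filter (fun x => (pvBitsL m x).count '1' = r)).map (fun x => '0' :: pvBitsL m x))
        ++ (((List.range (2 ^ m)).filter (fun x => (pvBitsL m x).count '1' + 1 = r)).map (fun x => '1' :: pvBitsL m x)) := by
  unfold pvE
  have hsplit : 2 ^ (m + 1) = 2 ^ m + 2 ^ m := by ring
  rw [hsplit, List.range_add, List.filter_append, List.map_append]
  congr 1
  · rw [List.filter_congr (q := fun x => decide ((pvBitsL m x).count '1' = r)) (fun x hx => by
      rw [pvBitsL_zero m x (List.mem_range.mp hx)]
      simp)]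
    apply List.map_congr_left
    intro x hx
    exact pvBitsL_zero m x (List.mem_range.mp (List.mem_filter.mp hx).1)
  · rw [List.filter_map, List.map_map]
    rw [List.filter_congr (q := fun x => decide ((pvBitsL m x).count '1' + 1 = r)) (fun y hy => by
      rw [Function.comp_apply, pvBitsL_one m y (List.mem_range.mp hy)]
      simp)]
    apply List.map_congr_left
    intro y hy
    rw [Function.comp_apply, pvBitsL_one m y (List.mem_range.mp (List.mem_filter.mp hy).1)]

theorem pvE_full (m : Nat) : pvE m m = [List.replicate m '1'] := by
  induction m with
  | zero => decide
  | succ m ih =>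
    rw [pvE_rec]
    have h1 : (List.range (2 ^ m)).filter (fun x => (pvBitsL m x).count '1' = m + 1) = [] := by
      apply List.filter_eq_nil_iff.mpr
      intro x hx
      have := List.count_le_length (l := pvBitsL m x) (a := '1')
      rw [pvBitsL_length] at this
      simp only [decide_eq_true_eq]
      omega
    have h2 : (List.range (2 ^ m)).filter (fun x => (pvBitsL m x).count '1' + 1 = m + 1)
        = (List.range (2 ^ m)).filter (fun x => (pvBitsL m x).count '1' = m) := by
      apply List.filter_congr
      intro x hx
      simp
    rw [h1, h2]
    have := ih
    unfold pvE at this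
    calc ([] : List ℕ).map (fun x => '0' :: pvBitsL m x)
          ++ ((List.range (2 ^ m)).filter (fun x => (pvBitsL m x).count '1' = m)).map (fun x => '1' :: pvBitsL m x)
        = ((List.range (2 ^ m)).filter (fun x => (pvBitsL m x).count '1' = m)).map ((fun w => '1' :: w) ∘ pvBitsL m) := by simp [Function.comp_def]
      _ = (((List.range (2 ^ m)).filter (fun x => (pvBitsL m x).count '1' = m)).map (pvBitsL m)).map (fun w => '1' :: w) := by rw [List.map_map]
      _ = [List.replicate (m + 1) '1'] := by rw [this]; simp [List.replicate_succ]

theorem pvE_zero (m : Nat) : pvE m 0 = [List.replicate m '0'] := by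
  induction m with
  | zero => decide
  | succ m ih =>
    rw [pvE_rec]
    have h2 : (List.range (2 ^ m)).filter (fun x => (pvBitsL m x).count '1' + 1 = 0) = [] := by
      apply List.filter_eq_nil_iff.mpr
      intro x hx
      simp
    rw [h2]
    have := ih
    unfold pvE at this
    calc ((List.range (2 ^ m)).filter (fun x => (pvBitsL m x).count '1' = 0)).map (fun x => '0' :: pvBitsL m x)
          ++ ([] : List ℕ).map (fun x => '1' :: pvBitsL m x)
        = (((List.range (2 ^ m)).filter (fun x => (pvBitsL m x).count '1' = 0)).map (pvBitsL m)).map (fun w => '0' :: w) := by simp [List.map_map, Function.comp_def]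
      _ = [List.replicate (m + 1) '0'] := by rw [this]; simp [List.replicate_succ]

def pvCombL (fuel : Nat) (N r : Int) : List (List Char) :=
  if N = r then [List.replicate N.toNat '1']
  else if r = 0 then [List.replicate N.toNat '0']
  else match fuel with
    | 0 => []
    | f + 1 => (pvCombL f (N - 1) r).map (fun w => '0' :: w) ++ (pvCombL f (N - 1) (r - 1)).map (fun w => '1' :: w)

theorem pvCombL_eq_E (fuel N r : Nat) (hf : N ≤ fuel) (hr : r ≤ N) :
    pvCombL fuel (N : Int) (r : Int) = pvE N r := by
  induction fuel generalizing N r with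
  | zero =>
    have hN : N = 0 := by omega
    have hrr : r = 0 := by omega
    subst hN; subst hrr
    decide
  | succ f ih =>
    rw [pvCombL]
    by_cases h1 : (N : Int) = (r : Int)
    · have : N = r := by exact_mod_cast h1
      subst this
      rw [if_pos h1, pvE_full]
      simp
    · rw [if_neg h1]
      by_cases h2 : (r : Int) = 0
      · have : r = 0 := by exact_mod_cast h2
        subst this
        rw [if_pos h2, pvE_zero]
        simp
      · rw [if_neg h2]
        have hrpos : 1 ≤ r := by
          rcases Nat.eq_zero_or_pos r with h | h
          · exact absurd (by exact_mod_cast congrArg (Nat.cast : Nat → Int) h) h2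
          · exact h
        have hrN : r < N := by
          rcases Nat.lt_or_ge r N with h | h
          · exact h
          · exact absurd (show (N:Int) = (r:Int) by exact_mod_cast (by omega : N = r)) h1
        have hc1 : (N : Int) - 1 = ((N - 1 : Nat) : Int) := by omega
        have hc2 : (r : Int) - 1 = ((r - 1 : Nat) : Int) := by omega
        rw [hc1, hc2, ih (N - 1) r (by omega) (by omega), ih (N - 1) (r - 1) (by omega) (by omega)]
        have hNs : N = (N - 1) + 1 := by omega
        rw [hNs, pvE_rec (N - 1) r]
        congr 1
        · unfold pvE; rw [List.map_map]; rfl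
        · unfold pvE
          rw [List.map_map]
          rw [List.filter_congr (q := fun x => decide ((pvBitsL (N-1) x).count '1' + 1 = r)) (fun x hx => by
            simp only [Nat.add_sub_cancel, decide_eq_decide]
            omega)]
          rfl

theorem pvCount_go_single (c : Char) (l : List Char) (fuel acc : Nat) (h : l.length ≤ fuel) :
    PySem.Chars.count.go [c] fuel l acc = acc + l.count c := by
  induction l generalizing fuel acc with
  | nil => cases fuel <;> simp [PySem.Chars.count.go]
  | cons a t ih =>
    match fuel with
    | 0 => simp at h
    | f + 1 =>
      rw [PySem.Chars.count.go]
      by_cases hac : a = c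
      · subst hac
        have hp : [a].isPrefixOf (a :: t) = true := by simp [List.isPrefixOf]
        rw [if_pos hp]
        simp only [List.length_singleton, List.drop_one, List.tail_cons]
        rw [ih f (acc + 1) (by simp at h; omega)]
        simp
        omega
      · have hp : [c].isPrefixOf (a :: t) = false := by
          simp [List.isPrefixOf]
          intro hh; exact absurd hh.symm hac
        rw [if_neg (by simp [hp])]
        rw [ih f acc (by simp at h; omega)]
        simp [hac]

theorem pvCount_single (s : String) (c : Char) :
    PySem.Str.count s (String.ofList [c]) = s.toList.count c := by
  rw [PySem.Str.count_eq]
  simp only [String.toList_ofList]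
  rw [PySem.Chars.count]
  simp only [List.isEmpty_cons, Bool.false_eq_true, if_false]
  rw [pvCount_go_single c s.toList s.toList.length 0 le_rfl]
  omega

theorem pvBits_toList (m x : Nat) : (pvBits (m : Int) (x : Int)).toList = pvBitsL m x := by
  unfold pvBits pvBitsL
  rw [String.toList_ofList, PySem.List.pyRange_zero_natCast, List.map_map]
  apply List.map_congr_left
  intro i hi
  have him : i < m := List.mem_range.mp hi
  have he : ((m : Int) - 1 - (i : Int)).toNat = m - 1 - i := by omega
  rw [Function.comp_apply, he]
  have hpow : (2 : Int) ^ (m - 1 - i) = ((2 ^ (m - 1 - i) : Nat) : Int) := by push_cast; ring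
  rw [hpow, PySem.Int.floordiv_natCast]
  have hmod : PySem.Int.mod ((x / 2 ^ (m - 1 - i) : Nat) : Int) 2
      = ((x / 2 ^ (m - 1 - i) % 2 : Nat) : Int) := by
    exact_mod_cast PySem.Int.mod_natCast (x / 2 ^ (m - 1 - i)) 2
  rw [hmod]
  norm_cast

theorem pvAltC_eq (m r : Nat) :
    ((PySem.List.pyRange 0 ((2 : Int) ^ m)).foldl
      (fun C x =>
        let bits := pvBits (m : Int) x
        if (PySem.Str.count bits "1" : Int) = (r : Int) then C ++ [bits] else C) []).map String.toList
      = pvE m r := by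
  have hshape : (fun (C : List String) (x : Int) =>
        let bits := pvBits (m : Int) x
        if (PySem.Str.count bits "1" : Int) = (r : Int) then C ++ [bits] else C)
      = (fun C x => if (fun x => decide ((PySem.Str.count (pvBits (m : Int) x) "1" : Int) = (r : Int))) x = true
          then C ++ [(fun x => pvBits (m : Int) x) x] else C) := by
    funext C x
    simp
  rw [hshape, PySem.List.foldl_append_if]
  have hpow : (2 : Int) ^ m = ((2 ^ m : Nat) : Int) := by push_cast; ring
  rw [List.nil_append, hpow, PySem.List.pyRange_zero_natCast, List.filter_map, List.map_map, List.map_map]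
  unfold pvE
  rw [List.filter_congr (q := fun x => decide ((pvBitsL m x).count '1' = r)) (fun x hx => by
    rw [Function.comp_apply]
    have h1 : ("1" : String) = String.ofList ['1'] := by rfl
    rw [h1, pvCount_single, pvBits_toList]
    simp)]
  apply List.map_congr_left
  intro x hx
  rw [Function.comp_apply, Function.comp_apply, pvBits_toList]

-- bridge A: pvComb builds exactly the pvCombL char lists
theorem pvAux_foldl (t : String) (c : Char) (ht : t.toList = [c]) (l : List Int) (s : String) :
    (l.foldl (fun s _ => s ++ t) s).toList = s.toList ++ List.replicate l.length c := by
  induction l generalizing s with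
  | nil => simp
  | cons a tl ih => simp [ih, ht, List.replicate_succ]

theorem pvOnes_toList (N : Int) (t : String) (c : Char) (ht : t.toList = [c]) (s : String) :
    ((PySem.List.pyRange 0 N).foldl (fun s _ => s ++ t) s).toList
      = s.toList ++ List.replicate N.toNat c := by
  rcases (by omega : N ≤ 0 ∨ 0 < N) with h | h
  · simp [PySem.List.pyRange, Int.toNat_of_nonpos h]
  · obtain ⟨m, rfl⟩ : ∃ m : Nat, N = (m : Int) := ⟨N.toNat, by omega⟩
    rw [PySem.List.pyRange_zero_natCast]
    simp [pvAux_foldl t c ht]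

theorem pvComb_toList (fuel : Nat) (N r : Int) :
    (pvComb fuel N r).map String.toList = pvCombL fuel N r := by
  induction fuel generalizing N r with
  | zero =>
    rw [pvComb, pvCombL]
    split_ifs <;> simp [pvOnes_toList N "1" '1' (by simp), pvOnes_toList N "0" '0' (by simp)]
  | succ f ih =>
    rw [pvComb, pvCombL]
    split_ifs <;> simp [pvOnes_toList N "1" '1' (by simp), pvOnes_toList N "0" '0' (by simp), ← ih, Function.comp_def]

-- final assembly: both combination lists are pvE m r
theorem pvInjMapToList : Function.Injective (List.map String.toList) :=
  List.map_injective_iff.mpr (fun _ _ h => String.toList_inj.mp h)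

theorem pvC_eq (m r : Nat) (hr : r ≤ m) :
    pvComb ((m : Int)).toNat (m : Int) (r : Int)
      = (PySem.List.pyRange 0 ((2 : Int) ^ ((m : Int)).toNat)).foldl
          (fun C x =>
            let bits := pvBits (m : Int) x
            if (PySem.Str.count bits "1" : Int) = (r : Int) then C ++ [bits] else C) [] := by
  apply pvInjMapToList
  rw [Int.toNat_natCast, pvComb_toList, pvCombL_eq_E m m r le_rfl hr, pvAltC_eq m r]

-- ===== VERDICT (by name: the statement is the Claim_ definition above) =====
theorem splitAndComb_spec : Claim_equal_splitAndComb := by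
  intro n parts Max firstPlayer _ hpre
  have hn : 0 ≤ n := hpre
  obtain ⟨m, rfl⟩ : ∃ m : Nat, n = (m : Int) := ⟨n.toNat, by omega⟩
  unfold Spec_splitAndComb
  simp only [splitAndComb, splitAndComb_alt]
  by_cases hfp : firstPlayer = 0
  · have hdiv : PySem.Int.floordiv (m : Int) 2 = ((m / 2 : Nat) : Int) := by
      exact_mod_cast PySem.Int.floordiv_natCast m 2
    rw [if_pos hfp, if_pos hfp, hdiv, pvC_eq m (m / 2) (Nat.div_le_self m 2)]
  · have hdiv : (m : Int) - PySem.Int.floordiv (m : Int) 2 = ((m - m / 2 : Nat) : Int) := by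
      have h1 : PySem.Int.floordiv (m : Int) 2 = ((m / 2 : Nat) : Int) := by
        exact_mod_cast PySem.Int.floordiv_natCast m 2
      rw [h1]
      have := Nat.div_le_self m 2
      omega
    rw [if_neg hfp, if_neg hfp, hdiv, pvC_eq m (m - m / 2) (by omega)]
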